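-- pv_equiv track=rewrite | github.com/Demi-urge/menace_sandbox | tools/workflow_graph_cli.py | _dependency_chains
-- ===== SOURCE A (Python) =====
-- from typing import Dict, List, Set, Tuple
--
-- def _dependency_chains(graph: Dict[str, List[str]], start: str) -> List[List[str]]:
--     chains: List[List[str]] = []
--
--     def dfs(path: List[str]) -> None:
--         last = path[-1]
--         children = graph.get(last, [])
--         if not children:
--             chains.append(path)
--             return
--         for nxt in children:
--             if nxt in path:
--                 continue
--             dfs(path + [nxt])
--
--     if start not in graph:
--         return []
--     dfs([start])
--     return chains
-- ===== SOURCE B (Python) =====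
-- from typing import Dict, List
--
--
-- def _dependency_chains(graph: Dict[str, List[str]], start: str) -> List[List[str]]:
--     # Round-based frontier rewriting: repeatedly rewrite the whole list of
--     # partial paths in one left-to-right pass (finished paths pass through,
--     # unfinished ones are replaced by their one-step extensions) until a
--     # fixpoint; flattening in order preserves the pre-order chain ordering.
--     if start not in graph:
--         return []
--     paths = [[start]]
--     while any(graph.get(p[-1], []) for p in paths):
--         new_paths: List[List[str]] = []
--         for p in paths:
--             children = graph.get(p[-1], [])
--             if not children:
--                 new_paths.append(p)
--             else:
--                 new_paths.extend(p + [c] for c in children if c not in p)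
--         paths = new_paths
--     return paths
-- ===== Notes on version B (the rewrite author's own statement) =====
-- stated objective: alternative
-- what changed: Replaced the nested recursive dfs helper mutating an outer accumulator with an iterative fixpoint loop that rewrites the whole list of partial paths round by round (finished paths pass through, unfinished ones are replaced in place by their one-step extensions), which preserves the pre-order chain ordering.
import Mathlib
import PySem

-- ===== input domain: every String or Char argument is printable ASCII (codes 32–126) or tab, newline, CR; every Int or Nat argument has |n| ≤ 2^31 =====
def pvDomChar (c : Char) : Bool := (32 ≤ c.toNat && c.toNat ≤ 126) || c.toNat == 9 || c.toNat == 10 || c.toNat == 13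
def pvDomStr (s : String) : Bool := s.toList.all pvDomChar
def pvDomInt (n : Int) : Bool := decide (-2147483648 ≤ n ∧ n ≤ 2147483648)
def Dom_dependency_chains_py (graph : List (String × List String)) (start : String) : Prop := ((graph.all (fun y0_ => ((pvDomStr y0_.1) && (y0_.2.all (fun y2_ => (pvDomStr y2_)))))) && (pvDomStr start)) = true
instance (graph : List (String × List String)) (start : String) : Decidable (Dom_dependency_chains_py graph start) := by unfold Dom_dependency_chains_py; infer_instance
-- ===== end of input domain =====

-- B replaces A's nested recursive dfs (mutating an outer accumulator) by an iterative
-- fixpoint loop that rewrites the whole list of partial paths round by round, preserving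
-- the pre-order chain ordering; same return value, similar cost (objective: alternative).

-- shared accessor: graph.get(path[-1], []) — first-match association-list lookup
-- (per the dict convention); path is nonempty at every call site, so the "" default
-- behind pyGet? is never used.
def pvLookup (graph : List (String × List String)) (k : String) : Option (List String) :=
  (graph.find? (fun kv => kv.1 == k)).map (fun kv => kv.2)

def pvChildren (graph : List (String × List String)) (path : List String) : List String :=
  (pvLookup graph ((PySem.List.pyGet? path (-1)).getD "")).getD []

-- ===== PORT A =====
-- literal port of A's dfs; the fuel argument only makes the recursion structural,
-- pvFuelA is proved large enough that the 0 branch is never reached from dependency_chains_py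
def pvDfsA (graph : List (String × List String)) : Nat → List String → List (List String) → List (List String)
  | 0, _, chains => chains
  | fuel+1, path, chains =>
    let children := pvChildren graph path
    if children = [] then chains ++ [path]
    else children.foldl (fun acc nxt => if nxt ∈ path then acc else pvDfsA graph fuel (path ++ [nxt]) acc) chains

def pvFuelA (graph : List (String × List String)) : Nat := (graph.flatMap Prod.snd).length + 1

def dependency_chains_py (graph : List (String × List String)) (start : String) : List (List String) :=
  if (pvLookup graph start).isNone then []
  else pvDfsA graph (pvFuelA graph) [start] []

-- ===== PORT B =====
-- one rewriting round of B's while-body: finished paths pass through, unfinished ones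
-- are replaced by their one-step extensions (the comprehension's condition becomes the
-- if-[]-else inside flatMap)
def pvRoundB (graph : List (String × List String)) (paths : List (List String)) : List (List String) :=
  paths.flatMap (fun p =>
    let children := pvChildren graph p
    if children = [] then [p]
    else children.flatMap (fun c => if c ∈ p then [] else [p ++ [c]]))

-- literal port of B's while-loop over rounds; fuel only bounds the number of rounds and
-- pvFuelB is proved large enough that the 0 branch is never reached
def pvLoopB (graph : List (String × List String)) : Nat → List (List String) → List (List String)
  | 0, paths => paths
  | fuel+1, paths =>
    if paths.any (fun p => pvChildren graph p ≠ []) then pvLoopB graph fuel (pvRoundB graph paths)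
    else paths

def pvFuelB (graph : List (String × List String)) : Nat := (graph.flatMap Prod.snd).length + 1

def dependency_chains_py_alt (graph : List (String × List String)) (start : String) : List (List String) :=
  if (pvLookup graph start).isNone then []
  else pvLoopB graph (pvFuelB graph) [[start]]

-- ===== PRECONDITION & SPEC =====
def Spec_dependency_chains_py (graph : List (String × List String)) (start : String) (out : List (List String)) : Prop := out = dependency_chains_py_alt graph start
instance (graph : List (String × List String)) (start : String) (out : List (List String)) : Decidable (Spec_dependency_chains_py graph start out) := by unfold Spec_dependency_chains_py; infer_instance

-- ===== CLAIM (what is proved, stated in full; the proofs are below) =====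
def Claim_equal_dependency_chains_py : Prop := ∀ (graph : List (String × List String)) (start : String), Dom_dependency_chains_py graph start → Spec_dependency_chains_py graph start (dependency_chains_py graph start)

-- ===== LEMMAS AND PROOFS =====

-- the multiset of all children occurrences
def pvN (graph : List (String × List String)) : List String := graph.flatMap Prod.snd
-- how many children occurrences are still outside path (bounds the remaining depth)
def pvExp (graph : List (String × List String)) (path : List String) : Nat :=
  ((pvN graph).filter (fun x => x ∉ path)).length

-- common functional specification of both ports
def pvC (graph : List (String × List String)) : Nat → List String → List (List String)
  | 0, _ => []
  | fuel+1, path =>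
    let children := pvChildren graph path
    if children = [] then [path]
    else children.flatMap (fun nxt => if nxt ∈ path then [] else pvC graph fuel (path ++ [nxt]))

def pvCfull (graph : List (String × List String)) (path : List String) : List (List String) :=
  pvC graph (pvExp graph path + 1) path

theorem pvChildren_subset (graph : List (String × List String)) (path : List String) :
    ∀ x ∈ pvChildren graph path, x ∈ pvN graph := by
  intro x hx
  unfold pvChildren pvLookup at hx
  cases hfind : graph.find? (fun kv => kv.1 == ((PySem.List.pyGet? path (-1)).getD "")) with
  | none => simp [hfind] at hx
  | some kv =>
    simp [hfind] at hx
    have hmem := List.mem_of_find?_eq_some hfind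
    exact List.mem_flatMap.mpr ⟨kv, hmem, hx⟩

theorem pv_filter_ne_lt {α : Type} [DecidableEq α] (l : List α) (a : α) (h : a ∈ l) :
    (l.filter (fun x => x ≠ a)).length < l.length := by
  induction l with
  | nil => simp at h
  | cons b bs ih =>
    simp only [List.filter_cons, List.length_cons]
    by_cases hba : b = a
    · have hd : (decide (b ≠ a)) = false := by simp [hba]
      rw [hd, if_neg Bool.false_ne_true]
      have h2 := List.length_filter_le (fun x => decide (x ≠ a)) bs
      omega
    · have hd : (decide (b ≠ a)) = true := by simp [hba]
      rw [hd, if_pos rfl]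
      rcases List.mem_cons.mp h with heq | hmem
      · exact absurd heq.symm hba
      · have := ih hmem
        simp only [List.length_cons]
        omega

theorem pvExp_snoc_lt (graph : List (String × List String)) (path : List String) (nxt : String)
    (hN : nxt ∈ pvN graph) (hp : nxt ∉ path) : pvExp graph (path ++ [nxt]) < pvExp graph path := by
  unfold pvExp
  have hfe : (pvN graph).filter (fun x => decide (x ∉ path ++ [nxt]))
      = ((pvN graph).filter (fun x => decide (x ∉ path))).filter (fun x => decide (x ≠ nxt)) := by
    rw [List.filter_filter]
    apply List.filter_congr
    intro x _
    simp [List.mem_append, not_or, and_comm]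
  rw [hfe]
  have hmemf : nxt ∈ (pvN graph).filter (fun x => decide (x ∉ path)) :=
    List.mem_filter.mpr ⟨hN, by simpa using hp⟩
  have := pv_filter_ne_lt ((pvN graph).filter (fun x => decide (x ∉ path))) nxt hmemf
  simpa using this

theorem pvC_mono (graph : List (String × List String)) :
    ∀ f g path, pvExp graph path < f → f ≤ g → pvC graph f path = pvC graph g path := by
  intro f
  induction f with
  | zero => intro g path h; omega
  | succ f ih =>
    intro g path hlt hle
    obtain ⟨g', rfl⟩ : ∃ g', g = g' + 1 := ⟨g - 1, by omega⟩
    simp only [pvC]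
    by_cases hc : pvChildren graph path = []
    · simp [hc]
    · simp only [if_neg hc]
      apply List.flatMap_congr
      · intro nxt hnxt
        by_cases hin : nxt ∈ path
        · simp [hin]
        · simp only [if_neg hin]
          have hN := pvChildren_subset graph path nxt hnxt
          have hdec := pvExp_snoc_lt graph path nxt hN hin
          exact ih g' (path ++ [nxt]) (by omega) (by omega)

theorem pvCfull_eq (graph : List (String × List String)) (path : List String) (f : Nat)
    (h : pvExp graph path < f) : pvC graph f path = pvCfull graph path := by
  unfold pvCfull
  exact (pvC_mono graph (pvExp graph path + 1) f path (by omega) (by omega)).symm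

theorem pvDfsA_eq (graph : List (String × List String)) :
    ∀ f path acc, pvExp graph path < f →
      pvDfsA graph f path acc = acc ++ pvC graph f path := by
  intro f
  induction f with
  | zero => intro path acc h; omega
  | succ f ih =>
    intro path acc hlt
    simp only [pvDfsA, pvC]
    by_cases hc : pvChildren graph path = []
    · simp [hc]
    · simp only [if_neg hc]
      have hcongr : (pvChildren graph path).foldl
          (fun acc nxt => if nxt ∈ path then acc else pvDfsA graph f (path ++ [nxt]) acc) acc
          = (pvChildren graph path).foldl
          (fun acc nxt => acc ++ (if nxt ∈ path then [] else pvC graph f (path ++ [nxt]))) acc := by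
        apply PySem.List.foldl_congr_mem
        intro a nxt hnxt
        by_cases hin : nxt ∈ path
        · simp [hin]
        · simp only [if_neg hin]
          have hN := pvChildren_subset graph path nxt hnxt
          have hdec := pvExp_snoc_lt graph path nxt hN hin
          exact ih (path ++ [nxt]) a (by omega)
      rw [hcongr, PySem.List.foldl_append_eq_flatMap]

theorem pvCfull_unfold (graph : List (String × List String)) (path : List String) :
    pvCfull graph path = if pvChildren graph path = [] then [path]
      else (pvChildren graph path).flatMap
        (fun nxt => if nxt ∈ path then [] else pvCfull graph (path ++ [nxt])) := by
  conv_lhs => rw [pvCfull]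
  simp only [pvC]
  by_cases hc : pvChildren graph path = []
  · simp [hc]
  · simp only [if_neg hc]
    apply List.flatMap_congr
    · intro nxt hnxt
      by_cases hin : nxt ∈ path
      · simp [hin]
      · simp only [if_neg hin]
        have hN := pvChildren_subset graph path nxt hnxt
        have hdec := pvExp_snoc_lt graph path nxt hN hin
        exact pvCfull_eq graph (path ++ [nxt]) (pvExp graph path) hdec

-- one round preserves the final answer: flatMapping pvCfull over the rewritten
-- list of paths gives the same chains as over the original list
theorem pvRoundB_preserves (graph : List (String × List String)) (paths : List (List String)) :
    (pvRoundB graph paths).flatMap (pvCfull graph) = paths.flatMap (pvCfull graph) := by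
  unfold pvRoundB
  rw [List.flatMap_assoc]
  apply List.flatMap_congr
  intro p _
  by_cases hc : pvChildren graph p = []
  · simp [hc, pvCfull_unfold graph p]
  · simp only [if_neg hc]
    rw [List.flatMap_assoc]
    conv_rhs => rw [pvCfull_unfold graph p, if_neg hc]
    apply List.flatMap_congr
    intro nxt _
    by_cases hin : nxt ∈ p
    · simp [hin]
    · simp [hin]

-- the loop invariant: every unfinished path has pvExp below the remaining fuel,
-- so the loop reaches the fixpoint and returns exactly the flattened chains
theorem pvLoopB_eq (graph : List (String × List String)) :
    ∀ f paths, (∀ p ∈ paths, pvChildren graph p ≠ [] → pvExp graph p < f) →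
      pvLoopB graph f paths = paths.flatMap (pvCfull graph) := by
  intro f
  induction f with
  | zero =>
    intro paths hinv
    simp only [pvLoopB]
    have hall : ∀ p ∈ paths, pvCfull graph p = [p] := by
      intro p hp
      by_cases hc : pvChildren graph p = []
      · rw [pvCfull_unfold graph p, if_pos hc]
      · exact absurd (hinv p hp hc) (by omega)
    calc paths = paths.flatMap (fun p => [p]) := by simp
      _ = paths.flatMap (pvCfull graph) := by
          apply List.flatMap_congr; intro p hp; exact (hall p hp).symm
  | succ f ih =>
    intro paths hinv
    simp only [pvLoopB]
    by_cases hany : paths.any (fun p => pvChildren graph p ≠ []) = true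
    · rw [if_pos hany]
      rw [ih (pvRoundB graph paths) ?_, pvRoundB_preserves]
      intro q hq hqc
      unfold pvRoundB at hq
      obtain ⟨p, hp, hqin⟩ := List.mem_flatMap.mp hq
      by_cases hc : pvChildren graph p = []
      · simp only [if_pos hc, List.mem_singleton] at hqin
        subst hqin
        exact absurd hc hqc
      · simp only [if_neg hc] at hqin
        obtain ⟨nxt, hnxt, hqin2⟩ := List.mem_flatMap.mp hqin
        by_cases hin : nxt ∈ p
        · simp [hin] at hqin2
        · simp only [if_neg hin, List.mem_singleton] at hqin2
          subst hqin2
          have hN := pvChildren_subset graph p nxt hnxt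
          have hdec := pvExp_snoc_lt graph p nxt hN hin
          have := hinv p hp hc
          omega
    · rw [if_neg hany]
      have hall : ∀ p ∈ paths, pvCfull graph p = [p] := by
        intro p hp
        have hc : pvChildren graph p = [] := by
          by_contra hne
          exact hany (List.any_eq_true.mpr ⟨p, hp, by simpa using hne⟩)
        rw [pvCfull_unfold graph p, if_pos hc]
      calc paths = paths.flatMap (fun p => [p]) := by simp
        _ = paths.flatMap (pvCfull graph) := by
            apply List.flatMap_congr; intro p hp; exact (hall p hp).symm

-- ===== VERDICT (by name: the statement is the Claim_ definition above) =====
theorem dependency_chains_py_spec : Claim_equal_dependency_chains_py := by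
  intro graph start _
  unfold Spec_dependency_chains_py dependency_chains_py dependency_chains_py_alt
  by_cases h : (pvLookup graph start).isNone
  · simp [h]
  · simp only [h]
    have hexp : pvExp graph [start] < pvFuelA graph := by
      unfold pvExp pvFuelA
      have := List.length_filter_le (fun x => decide (x ∉ [start])) (pvN graph)
      unfold pvN at *
      omega
    rw [pvDfsA_eq graph (pvFuelA graph) [start] [] hexp]
    rw [pvCfull_eq graph [start] (pvFuelA graph) hexp]
    rw [pvLoopB_eq graph (pvFuelB graph) [[start]] ?_]
    · simp
    · intro p hp _
      simp only [List.mem_singleton] at hp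
      subst hp
      unfold pvExp pvFuelB
      have := List.length_filter_le (fun x => decide (x ∉ [start])) (pvN graph)
      unfold pvN at *
      omega
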